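-- pv_equiv track=rewrite | github.com/724thomas/CodingChallenge_Python | baekjoon/17291.py | solution
-- ===== SOURCE A (Python) =====
-- from collections import defaultdict
--
-- def solution(n):
--     dies = defaultdict(int)
--
--     bugs = 1
--     dies[4] = 1
--     for year in range(2, n + 1):
--         dies[year + 4 - year % 2] += bugs
--         bugs *= 2
--         bugs -= dies[year]
--     return bugs
--
--     ans = 1
--     return ans
-- ===== SOURCE B (Python) =====
-- def solution(n):
--     # Even-year subsequence c(k) = population(2k) satisfies the second-order
--     # recurrence c(k) = 3*c(k-1) + 2*c(k-2) with c(1)=2, c(2)=7 (odd years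
--     # merely double the previous year), so iterate that recurrence n//2 - 1
--     # times and double once when n is odd.
--     if n <= 1:
--         return 1
--     a, b = 2, 7
--     for _ in range(n // 2 - 1):
--         a, b = b, 3 * b + 2 * a
--     return a if n % 2 == 0 else 2 * a
-- ===== Notes on version B (the rewrite author's own statement) =====
-- stated objective: faster
-- what changed: Replaces A's year-by-year simulation with a scheduled-deaths dict by a closed second-order recurrence derived for the even-year subsequence (c(k)=3c(k-1)+2c(k-2), c(1)=2, c(2)=7; odd years just double), iterating only n//2-1 times over a two-integer state.
import Mathlib
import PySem

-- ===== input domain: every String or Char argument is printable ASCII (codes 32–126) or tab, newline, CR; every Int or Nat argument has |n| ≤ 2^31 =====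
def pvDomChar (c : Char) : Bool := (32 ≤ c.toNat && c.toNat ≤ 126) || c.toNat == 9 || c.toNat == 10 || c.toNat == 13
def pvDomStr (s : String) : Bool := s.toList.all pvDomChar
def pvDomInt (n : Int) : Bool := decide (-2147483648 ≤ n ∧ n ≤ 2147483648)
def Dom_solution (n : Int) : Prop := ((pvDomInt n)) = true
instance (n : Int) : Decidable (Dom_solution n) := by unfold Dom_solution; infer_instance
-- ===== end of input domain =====

-- B replaces A's year-by-year simulation (dict of scheduled deaths) by a derived
-- second-order recurrence on the even-year subsequence, iterated only n//2-1 times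
-- (objective: faster by a constant factor).

-- ===== PORT A =====
-- loop body of A: dies[year+4-year%2] += bugs; bugs *= 2; bugs -= dies[year]
def solutionStepA (st : PySem.Dict Int Int × Int) (year : Int) : PySem.Dict Int Int × Int :=
  let dies := st.1.modify (year + 4 - PySem.Int.mod year 2) 0 (· + st.2)
  let bugs := st.2 * 2
  (dies, bugs - dies.getD year 0)

def solution (n : Int) : Int :=
  let dies : PySem.Dict Int Int := (PySem.Dict.empty).insert 4 1
  let st := (PySem.List.pyRange 2 (n + 1) 1).foldl solutionStepA (dies, 1)
  st.2

-- ===== PORT B =====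
-- loop body of B: a, b = b, 3*b + 2*a
def solutionStepB (ab : Int × Int) (_ : Int) : Int × Int :=
  (ab.2, 3 * ab.2 + 2 * ab.1)

def solution_alt (n : Int) : Int :=
  if n ≤ 1 then 1
  else
    let st := (PySem.List.pyRange 0 (PySem.Int.floordiv n 2 - 1) 1).foldl solutionStepB (2, 7)
    if PySem.Int.mod n 2 = 0 then st.1 else 2 * st.1

-- ===== PRECONDITION & SPEC =====
def Spec_solution (n : Int) (out : Int) : Prop := out = solution_alt n
instance (n : Int) (out : Int) : Decidable (Spec_solution n out) := by unfold Spec_solution; infer_instance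

-- ===== CLAIM (what is proved, stated in full; the proofs are below) =====
def Claim_equal_solution : Prop := ∀ (n : Int), Dom_solution n → Spec_solution n (solution n)

-- ===== LEMMAS AND PROOFS =====

-- proof-side helper: the population sequence as a sliding window of the last
-- five values (p5, p4, p3, p2, p1); used only to characterise A's dict fold
def solutionStepW (w : Int × Int × Int × Int × Int) (y : Int) : Int × Int × Int × Int × Int :=
  let deaths := if PySem.Int.mod y 2 ≠ 0 then 0
                else w.1 + w.2.1 + (if y = 4 then 1 else 0)
  (w.2.1, w.2.2.1, w.2.2.2.1, w.2.2.2.2, 2 * w.2.2.2.2 - deaths)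

def solutionWin (hi : Int) : Int × Int × Int × Int × Int :=
  (PySem.List.pyRange 2 hi 1).foldl solutionStepW (0, 0, 0, 0, 1)

-- the even-year subsequence: cseq k = population in year 2*(k+1)
def solutionCseq : Nat → Int
  | 0 => 2
  | 1 => 7
  | (k+2) => 3 * solutionCseq (k+1) + 2 * solutionCseq k

-- pending deaths stored in A's dict for a future year z, expressed from the window
def solutionPend (y : Int) (w : Int × Int × Int × Int × Int) (z : Int) : Int :=
  if z % 2 ≠ 0 then 0
  else (if z = y + 1 then w.1 + w.2.1
        else if z = y + 2 then w.2.1 + w.2.2.1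
        else if z = y + 3 then w.2.2.1 + w.2.2.2.1
        else if z = y + 4 then w.2.2.2.1
        else 0) + (if z = 4 then 1 else 0)

-- joint invariant after both folds have processed years 2..y
def solutionInv (y : Int) (a : PySem.Dict Int Int × Int) (w : Int × Int × Int × Int × Int) : Prop :=
  a.2 = w.2.2.2.2 ∧ ∀ z : Int, y < z → a.1.getD z 0 = solutionPend y w z

theorem solution_mod_two (y : Int) : PySem.Int.mod y 2 = y % 2 :=
  PySem.Int.mod_eq_emod_of_pos (by omega)

theorem solution_inv_base :
    solutionInv 1 ((PySem.Dict.empty.insert 4 1 : PySem.Dict Int Int), 1) (0, 0, 0, 0, 1) := by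
  refine ⟨rfl, ?_⟩
  intro z hz
  rw [PySem.Dict.getD_insert, PySem.Dict.getD_empty]
  unfold solutionPend
  split_ifs <;> first | rfl | omega

set_option maxHeartbeats 2000000 in
theorem solution_inv_step (y : Int) (hy : 1 ≤ y) (a : PySem.Dict Int Int × Int)
    (w : Int × Int × Int × Int × Int) (h : solutionInv y a w) :
    solutionInv (y + 1) (solutionStepA a (y + 1)) (solutionStepW w (y + 1)) := by
  obtain ⟨hb, hd⟩ := h
  have hmod := solution_mod_two (y + 1)
  constructor
  · -- bugs component
    show _ * 2 - _ = 2 * w.2.2.2.2 - _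
    rw [hmod, PySem.Dict.getD_modify, if_neg (by omega : ¬ (y + 1 = y + 1 + 4 - (y + 1) % 2)),
        hd (y + 1) (by omega), hb]
    unfold solutionPend
    split_ifs <;> omega
  · intro z hz
    show (a.1.modify ((y + 1) + 4 - PySem.Int.mod (y + 1) 2) 0 (· + a.2)).getD z 0
        = solutionPend (y + 1) (solutionStepW w (y + 1)) z
    rw [hmod, PySem.Dict.getD_modify]
    have hz' := hd z (by omega)
    by_cases hzk : z = (y + 1) + 4 - (y + 1) % 2
    · rw [if_pos hzk, ← hzk, hz', hb]
      unfold solutionPend solutionStepW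
      rw [hmod]
      dsimp only
      split_ifs <;> omega
    · rw [if_neg hzk, hz']
      unfold solutionPend solutionStepW
      rw [hmod]
      dsimp only
      split_ifs <;> omega

theorem solution_inv_main (m : Nat) :
    solutionInv (1 + m)
      ((PySem.List.pyRange 2 (2 + m) 1).foldl solutionStepA ((PySem.Dict.empty.insert 4 1 : PySem.Dict Int Int), 1))
      (solutionWin (2 + m)) := by
  unfold solutionWin
  induction m with
  | zero =>
      rw [show ((2 : Int) + (0 : Nat)) = 2 by norm_num, PySem.List.pyRange_one_eq_nil (by omega)]
      exact solution_inv_base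
  | succ k ih =>
      have hsplit : PySem.List.pyRange 2 (2 + (k + 1 : Nat)) 1
          = PySem.List.pyRange 2 (2 + k) 1 ++ [2 + (k : Int)] := by
        have := PySem.List.pyRange_one_succ_right (a := 2) (b := 2 + (k : Int)) (by omega)
        rw [show ((2 : Int) + ((k : Nat) + 1 : Nat)) = (2 + (k : Int)) + 1 by push_cast; ring]
        exact this
      rw [hsplit, List.foldl_append, List.foldl_append]
      simp only [List.foldl_cons, List.foldl_nil]
      have := solution_inv_step (1 + k) (by omega) _ _ ih
      rw [show (1 : Int) + (k : Nat) + 1 = 2 + (k : Int) by ring] at this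
      rw [show (1 : Int) + ((k + 1 : Nat) : Int) = 2 + (k : Int) by push_cast; ring]
      exact this

-- A's result equals the last component of the sliding window
theorem solution_eq_win (n : Int) (hn : 2 ≤ n) : solution n = (solutionWin (n + 1)).2.2.2.2 := by
  unfold solution
  have hm : n + 1 = 2 + ((n - 1).toNat : Int) := by omega
  rw [hm]
  exact (solution_inv_main (n - 1).toNat).1

-- the window at odd year 2k+7 expressed through the even-year subsequence
theorem solution_win_odd (k : Nat) :
    solutionWin (2 * (k : Int) + 8)
      = (2 * solutionCseq k, solutionCseq (k+1), 2 * solutionCseq (k+1),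
         solutionCseq (k+2), 2 * solutionCseq (k+2)) := by
  induction k with
  | zero => decide
  | succ j ih =>
      have hsplit : PySem.List.pyRange 2 (2 * ((j : Int) + 1) + 8) 1
          = (PySem.List.pyRange 2 (2 * (j : Int) + 8) 1 ++ [2 * (j : Int) + 8]) ++ [2 * (j : Int) + 9] := by
        have h1 := PySem.List.pyRange_one_succ_right (a := 2) (b := 2 * (j : Int) + 8) (by omega)
        have h2 := PySem.List.pyRange_one_succ_right (a := 2) (b := 2 * (j : Int) + 9) (by omega)
        rw [show 2 * ((j : Int) + 1) + 8 = (2 * (j : Int) + 9) + 1 by ring, h2,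
            show 2 * (j : Int) + 9 = (2 * (j : Int) + 8) + 1 by ring, h1]
      unfold solutionWin at *
      push_cast
      rw [hsplit, List.foldl_append, List.foldl_append]
      simp only [List.foldl_cons, List.foldl_nil]
      rw [ih]
      unfold solutionStepW
      rw [solution_mod_two, solution_mod_two]
      have h8 : (2 * (j : Int) + 8) % 2 = 0 := by omega
      have h9 : (2 * (j : Int) + 9) % 2 ≠ 0 := by omega
      have hne4 : ¬ (2 * (j : Int) + 8 = 4) := by omega
      simp only [h8, h9, if_neg hne4, ne_eq, not_true_eq_false, if_false, not_false_eq_true,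
        if_true, add_zero]
      have e1 : solutionCseq (j + 1 + 1) = 3 * solutionCseq (j + 1) + 2 * solutionCseq j := rfl
      have e2 : solutionCseq (j + 1 + 2) = 3 * solutionCseq (j + 1 + 1) + 2 * solutionCseq (j + 1) := rfl
      have e3 : solutionCseq (j + 2) = 3 * solutionCseq (j + 1) + 2 * solutionCseq j := rfl
      have e4 : solutionCseq (j + 3) = 3 * solutionCseq (j + 2) + 2 * solutionCseq (j + 1) := rfl
      refine Prod.ext ?_ (Prod.ext ?_ (Prod.ext ?_ (Prod.ext ?_ ?_))) <;> dsimp only <;> omega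

-- B's fold computes consecutive values of the even-year subsequence
theorem solution_fold_cseq (m : Nat) :
    (PySem.List.pyRange 0 (m : Int) 1).foldl solutionStepB (2, 7)
      = (solutionCseq m, solutionCseq (m + 1)) := by
  induction m with
  | zero => decide
  | succ j ih =>
      have hsplit : PySem.List.pyRange 0 ((j : Int) + 1) 1
          = PySem.List.pyRange 0 (j : Int) 1 ++ [(j : Int)] :=
        PySem.List.pyRange_one_succ_right (a := 0) (b := (j : Int)) (by omega)
      push_cast
      rw [hsplit, List.foldl_append, ih]
      simp only [List.foldl_cons, List.foldl_nil]
      have e1 : solutionCseq (j + 1 + 1) = 3 * solutionCseq (j + 1) + 2 * solutionCseq j := rfl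
      unfold solutionStepB
      refine Prod.ext rfl ?_
      dsimp only
      omega

-- ===== VERDICT (by name: the statement is the Claim_ definition above) =====
theorem solution_spec : Claim_equal_solution := by
  intro n _
  unfold Spec_solution
  by_cases h1 : n ≤ 1
  · unfold solution solution_alt
    rw [PySem.List.pyRange_one_eq_nil (by omega), if_pos h1]
    rfl
  · by_cases h7 : n ≤ 7
    · interval_cases n <;> decide
    · -- n ≥ 8: split on parity
      unfold solution_alt
      rw [if_neg h1]
      have hmodn := solution_mod_two n
      have hfd : PySem.Int.floordiv n 2 = n / 2 := by
        exact PySem.Int.floordiv_eq_ediv_of_pos (by omega)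
      by_cases hpar : n % 2 = 0
      · -- even n = 2m, m ≥ 4
        obtain ⟨m, hm, hm4⟩ : ∃ m : Nat, n = 2 * (m : Int) ∧ 4 ≤ m := by
          refine ⟨n.toNat / 2, by omega, by omega⟩
        obtain ⟨j, hj⟩ : ∃ j : Nat, m = j + 4 := ⟨m - 4, by omega⟩
        have hA : solution n = (solutionWin (n + 1)).2.2.2.2 := solution_eq_win n (by omega)
        have hsplit : PySem.List.pyRange 2 (n + 1) 1
            = PySem.List.pyRange 2 (2 * (j : Int) + 8) 1 ++ [2 * (j : Int) + 8] := by
          have := PySem.List.pyRange_one_succ_right (a := 2) (b := 2 * (j : Int) + 8) (by omega)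
          rw [show n + 1 = (2 * (j : Int) + 8) + 1 by rw [hm, hj]; push_cast; ring]
          exact this
        have hwin := solution_win_odd j
        rw [hA]
        unfold solutionWin at *
        rw [hsplit, List.foldl_append, hwin]
        simp only [List.foldl_cons, List.foldl_nil]
        unfold solutionStepW
        rw [solution_mod_two]
        have h8 : (2 * (j : Int) + 8) % 2 = 0 := by omega
        have hne4 : ¬ (2 * (j : Int) + 8 = 4) := by omega
        simp only [h8, if_neg hne4, ne_eq, not_true_eq_false, if_false, add_zero]
        rw [hmodn, if_pos hpar, hfd]
        have hiter : n / 2 - 1 = ((j + 3 : Nat) : Int) := by omega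
        rw [hiter, solution_fold_cseq]
        have hr2 : solutionCseq (j + 2) = 3 * solutionCseq (j + 1) + 2 * solutionCseq j := rfl
        have hr3 : solutionCseq (j + 3) = 3 * solutionCseq (j + 2) + 2 * solutionCseq (j + 1) := rfl
        dsimp only
        omega
      · -- odd n = 2m+1, m ≥ 4
        obtain ⟨m, hm, hm4⟩ : ∃ m : Nat, n = 2 * (m : Int) + 1 ∧ 4 ≤ m := by
          refine ⟨n.toNat / 2, by omega, by omega⟩
        obtain ⟨j, hj⟩ : ∃ j : Nat, m = j + 4 := ⟨m - 4, by omega⟩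
        have hA : solution n = (solutionWin (n + 1)).2.2.2.2 := solution_eq_win n (by omega)
        have hwin := solution_win_odd (j + 1)
        rw [hA, show n + 1 = 2 * ((j : Int) + 1) + 8 by rw [hm, hj]; push_cast; ring]
        rw [show ((2 : Int) * ((j : Nat) + 1 : Nat) + 8) = 2 * ((j : Int) + 1) + 8 by push_cast; ring] at hwin
        rw [hwin]
        rw [hmodn, if_neg hpar, hfd]
        have hiter : n / 2 - 1 = ((j + 3 : Nat) : Int) := by omega
        rw [hiter, solution_fold_cseq]
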